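-- pv_equiv track=rewrite | github.com/gcomneno/qres-telescope | src/qrt/ghost_energy.py | _normalize_coeffs
-- ===== SOURCE A (Python) =====
-- from functools import reduce
-- from math import gcd
-- from typing import Dict, List, Tuple
--
-- CoeffVector = Tuple[int, ...]
--
-- def _normalize_coeffs(coeffs: CoeffVector) -> CoeffVector:
--     """
--     Normalizza un vettore di coefficienti per evitare duplicati banali.
--
--     - divide per il MCD dei coefficienti (se > 1)
--     - forza il primo coefficiente non nullo a essere positivo
--     """
--     # Se sono tutti zero, non ha senso
--     if all(c == 0 for c in coeffs):
--         return coeffs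
--
--     # Riduzione per il MCD
--     non_zero = [abs(c) for c in coeffs if c != 0]
--     g = reduce(gcd, non_zero) if non_zero else 1
--     if g > 1:
--         coeffs = tuple(c // g for c in coeffs)
--
--     # Forza il primo coeff non nullo ad essere positivo
--     for c in coeffs:
--         if c < 0:
--             coeffs = tuple(-x for x in coeffs)
--             break
--         if c > 0:
--             break
--
--     return coeffs
-- ===== SOURCE B (Python) =====
-- def _normalize_coeffs(coeffs):
--     # Trial-division normalization: no gcd at all. The wanted divisor is the
--     # largest common divisor of all coefficients; it divides the smallest
--     # nonzero magnitude m, so enumerate the divisors of m (sqrt-bounded) and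
--     # take the largest one dividing every coefficient.
--     nonzero_abs = [abs(c) for c in coeffs if c != 0]
--     if not nonzero_abs:
--         return coeffs
--     m = min(nonzero_abs)
--     divs = []
--     i = 1
--     while i * i <= m:
--         if m % i == 0:
--             divs.append(i)
--             if i != m // i:
--                 divs.append(m // i)
--         i += 1
--     g = max(d for d in divs if all(c % d == 0 for c in coeffs))
--     sign = 1 if next(c for c in coeffs if c != 0) > 0 else -1
--     return tuple(sign * (c // g) for c in coeffs)
-- ===== Notes on version B (the rewrite author's own statement) =====
-- stated objective: alternative
-- what changed: B never calls gcd: it takes one nonzero magnitude m, enumerates the divisors of m by sqrt-bounded trial division, picks the largest divisor that divides every coefficient, and emits the result in one signed-multiplication map, replacing A's gcd reduce + conditional divide pass + sign-scan + flip pass.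
import Mathlib
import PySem

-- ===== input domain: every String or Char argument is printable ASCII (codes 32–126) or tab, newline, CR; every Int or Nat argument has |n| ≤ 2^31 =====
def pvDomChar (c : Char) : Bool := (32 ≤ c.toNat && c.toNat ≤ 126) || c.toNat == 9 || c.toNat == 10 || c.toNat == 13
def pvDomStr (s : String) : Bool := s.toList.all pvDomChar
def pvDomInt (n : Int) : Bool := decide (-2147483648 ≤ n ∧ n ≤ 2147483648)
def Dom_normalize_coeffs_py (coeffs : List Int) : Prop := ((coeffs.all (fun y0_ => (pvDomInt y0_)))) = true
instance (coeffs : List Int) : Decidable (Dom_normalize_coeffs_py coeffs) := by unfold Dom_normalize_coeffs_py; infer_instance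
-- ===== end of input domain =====

-- B replaces A's gcd-reduce + divide pass + sign-scan + flip pass by a divisor
-- enumeration: trial division up to sqrt of one nonzero magnitude, then the
-- largest enumerated divisor dividing every coefficient (objective: alternative).

-- Python's math.gcd on ints: always the nonnegative gcd.
def pyGcd (a b : Int) : Int := (Int.gcd a b : Int)

-- ===== PORT A =====
-- the `for c in coeffs: … break` sign-fixing loop of A (orig = current tuple)
def pvSignScan (orig : List Int) : List Int → List Int
  | [] => orig
  | c :: rest =>
      if c < 0 then orig.map (fun x => -x)
      else if c > 0 then orig
      else pvSignScan orig rest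

def normalize_coeffs_py (coeffs : List Int) : List Int :=
  if coeffs.all (fun c => c == 0) then coeffs
  else
    let non_zero := (coeffs.filter (fun c => !(c == 0))).map (fun c => |c|)
    let g : Int :=
      match non_zero with
      | [] => 1
      | h :: t => t.foldl pyGcd h          -- reduce(gcd, non_zero)
    let coeffs1 := if g > 1 then coeffs.map (fun c => PySem.Int.floordiv c g) else coeffs
    pvSignScan coeffs1 coeffs1

-- ===== PORT B =====
-- the `while i * i <= m:` divisor-collecting loop of Source B (appends i and m // i)
def pvDivsFrom (m i : Int) : List Int :=
  if _h : i * i ≤ m then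
    (if PySem.Int.mod m i == 0 then
        i :: (if i ≠ PySem.Int.floordiv m i then [PySem.Int.floordiv m i] else [])
      else []) ++ pvDivsFrom m (i + 1)
  else []
termination_by (m - i + 1).toNat
decreasing_by
  have h1 : 2 * i - 1 ≤ i * i := by nlinarith [mul_self_nonneg (i - 1)]
  have h2 : 0 ≤ i * i := mul_self_nonneg i
  omega

-- next(c for c in coeffs if c != 0); the 0 default is unreachable (guarded by nonzero_abs ≠ [])
def pvFirstNZ : List Int → Int
  | [] => 0
  | c :: rest => if c ≠ 0 then c else pvFirstNZ rest

def normalize_coeffs_py_alt (coeffs : List Int) : List Int :=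
  let nonzero_abs := (coeffs.filter (fun c => !(c == 0))).map (fun c => |c|)
  if nonzero_abs.isEmpty then coeffs
  else
    let m := (PySem.List.min? nonzero_abs (fun x => x)).getD 0       -- min(nonzero_abs); some, list nonempty
    let divs := pvDivsFrom m 1
    -- max(d for d in divs if all(...)); the generator is never empty (1 qualifies)
    let g := (PySem.List.max? (divs.filter
                (fun d => coeffs.all (fun c => PySem.Int.mod c d == 0))) (fun x => x)).getD 0
    let sign : Int := if pvFirstNZ coeffs > 0 then 1 else -1
    coeffs.map (fun c => sign * PySem.Int.floordiv c g)

-- ===== PRECONDITION & SPEC =====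
def Spec_normalize_coeffs_py (coeffs : List Int) (out : List Int) : Prop := out = normalize_coeffs_py_alt coeffs
instance (coeffs : List Int) (out : List Int) : Decidable (Spec_normalize_coeffs_py coeffs out) := by unfold Spec_normalize_coeffs_py; infer_instance

-- ===== CLAIM (what is proved, stated in full; the proofs are below) =====
def Claim_equal_normalize_coeffs_py : Prop := ∀ (coeffs : List Int), Dom_normalize_coeffs_py coeffs → Spec_normalize_coeffs_py coeffs (normalize_coeffs_py coeffs)

-- ===== LEMMAS AND PROOFS =====

theorem pyGcd_nonneg (a b : Int) : 0 ≤ pyGcd a b := by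
  simp [pyGcd]

theorem pyGcd_zero_left {a : Int} (ha : 0 ≤ a) : pyGcd 0 a = a := by
  simp [pyGcd, Int.gcd, Int.natAbs_of_nonneg ha]

theorem pyGcd_zero_right {a : Int} (ha : 0 ≤ a) : pyGcd a 0 = a := by
  simp [pyGcd, Int.gcd, Int.natAbs_of_nonneg ha]

theorem pyGcd_abs_right (a b : Int) : pyGcd a |b| = pyGcd a b := by
  simp [pyGcd, Int.gcd, Int.natAbs_abs]

theorem pyGcd_dvd_left (a b : Int) : pyGcd a b ∣ a := Int.gcd_dvd_left a b

theorem pyGcd_dvd_right (a b : Int) : pyGcd a b ∣ b := Int.gcd_dvd_right a b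

theorem fold_pyGcd_nonneg : ∀ (l : List Int) (a : Int), 0 ≤ a → 0 ≤ l.foldl pyGcd a
  | [], a, ha => ha
  | c :: t, a, _ => fold_pyGcd_nonneg t (pyGcd a c) (pyGcd_nonneg a c)

-- the fold divides its seed and every element
theorem fold_pyGcd_dvd : ∀ (l : List Int) (a : Int),
    (l.foldl pyGcd a) ∣ a ∧ ∀ c ∈ l, (l.foldl pyGcd a) ∣ c
  | [], a => ⟨dvd_refl a, by simp⟩
  | c :: t, a => by
      obtain ⟨h1, h2⟩ := fold_pyGcd_dvd t (pyGcd a c)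
      refine ⟨h1.trans (pyGcd_dvd_left a c), ?_⟩
      intro x hx
      rcases List.mem_cons.mp hx with rfl | hx
      · exact h1.trans (pyGcd_dvd_right a x)
      · exact h2 x hx

-- a common divisor of seed and elements divides the fold
theorem dvd_fold_pyGcd : ∀ (l : List Int) (a x : Int), x ∣ a → (∀ c ∈ l, x ∣ c) →
    x ∣ l.foldl pyGcd a
  | [], a, x, ha, _ => ha
  | c :: t, a, x, ha, hl => by
      have hc : x ∣ c := hl c (List.mem_cons_self ..)
      have : x ∣ pyGcd a c := by
        simp only [pyGcd]
        have h1 : x.natAbs ∣ Int.gcd a c :=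
          Nat.dvd_gcd (Int.natAbs_dvd_natAbs.mpr ha) (Int.natAbs_dvd_natAbs.mpr hc)
        exact Int.natAbs_dvd.mp (Int.natCast_dvd_natCast.mpr h1)
      exact dvd_fold_pyGcd t (pyGcd a c) x this (fun y hy => hl y (List.mem_cons_of_mem _ hy))

-- dropping zeros and taking absolute values does not change the fold
theorem fold_pyGcd_filter_abs : ∀ (l : List Int) (a : Int), 0 ≤ a →
    ((l.filter (fun c => !(c == 0))).map (fun c => |c|)).foldl pyGcd a = l.foldl pyGcd a
  | [], _, _ => rfl
  | c :: t, a, ha => by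
      by_cases hc : c = 0
      · subst hc
        simpa [List.filter_cons, pyGcd_zero_right ha] using fold_pyGcd_filter_abs t a ha
      · have hf : (c :: t).filter (fun c => !(c == 0)) = c :: t.filter (fun c => !(c == 0)) :=
          List.filter_cons_of_pos (by simp [hc])
        rw [hf, List.map_cons, List.foldl_cons, List.foldl_cons, pyGcd_abs_right]
        exact fold_pyGcd_filter_abs t (pyGcd a c) (pyGcd_nonneg a c)

-- exact floor division
theorem fdiv_exact {d c : Int} (hd : d ≠ 0) (h : d ∣ c) :
    PySem.Int.floordiv c d = c / d := by
  obtain ⟨q, rfl⟩ := h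
  simp [PySem.Int.floordiv, Int.mul_fdiv_cancel_left _ hd, Int.mul_ediv_cancel_left _ hd]

-- sign of the exact quotient matches the dividend (positive divisor)
theorem fdiv_neg_iff {d c : Int} (hd : 0 < d) (h : d ∣ c) :
    (PySem.Int.floordiv c d < 0 ↔ c < 0) ∧ (PySem.Int.floordiv c d = 0 ↔ c = 0) := by
  obtain ⟨q, rfl⟩ := h
  rw [fdiv_exact (by omega) ⟨q, rfl⟩, Int.mul_ediv_cancel_left _ (by omega)]
  constructor
  · constructor
    · intro hq; exact Int.mul_neg_of_pos_of_neg hd hq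
    · intro hq; nlinarith
  · constructor
    · intro hq; simp [hq]
    · intro hq; rcases mul_eq_zero.mp hq with h | h <;> omega

-- the sign-fixing loop, characterised by the first nonzero element
theorem signScan_eq : ∀ (orig l : List Int),
    pvSignScan orig l = if pvFirstNZ l < 0 then orig.map (fun x => -x) else orig
  | orig, [] => by simp [pvSignScan, pvFirstNZ]
  | orig, c :: rest => by
      by_cases h1 : c < 0
      · have : c ≠ 0 := by omega
        simp [pvSignScan, pvFirstNZ, h1, this]
      · by_cases h2 : c > 0
        · have : c ≠ 0 := by omega
          simp [pvSignScan, pvFirstNZ, h1, h2, this]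
        · have hc : c = 0 := by omega
          simp [pvSignScan, pvFirstNZ, hc, signScan_eq orig rest]

-- dividing by a positive exact divisor preserves which element is the first nonzero (in sign)
theorem firstNZ_map_fdiv {d : Int} (hd : 0 < d) : ∀ (l : List Int), (∀ c ∈ l, d ∣ c) →
    (pvFirstNZ (l.map (fun c => PySem.Int.floordiv c d)) < 0 ↔ pvFirstNZ l < 0)
  | [], _ => by simp [pvFirstNZ]
  | c :: rest, h => by
      have hdc := h c (List.mem_cons_self ..)
      obtain ⟨hlt, heq⟩ := fdiv_neg_iff hd hdc
      by_cases hc : c = 0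
      · have : PySem.Int.floordiv c d = 0 := heq.mpr hc
        simp only [List.map_cons, pvFirstNZ, hc]
        simpa using firstNZ_map_fdiv hd rest (fun x hx => h x (List.mem_cons_of_mem _ hx))
      · have : PySem.Int.floordiv c d ≠ 0 := fun h0 => hc (heq.mp h0)
        simp [pvFirstNZ, hc, this, hlt]

theorem firstNZ_ne_zero : ∀ (l : List Int), (∃ c ∈ l, c ≠ 0) → pvFirstNZ l ≠ 0
  | [], h => by simp at h
  | c :: rest, h => by
      by_cases hc : c = 0
      · subst hc
        have : ∃ x ∈ rest, x ≠ 0 := by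
          obtain ⟨x, hx, hxne⟩ := h
          rcases List.mem_cons.mp hx with rfl | hx
          · omega
          · exact ⟨x, hx, hxne⟩
        simpa [pvFirstNZ] using firstNZ_ne_zero rest this
      · simp [pvFirstNZ, hc]

-- guard of the divisor loop implies i ≤ m (and 0 ≤ m)
theorem guard_le {i m : Int} (h : i * i ≤ m) : i ≤ m ∧ 0 ≤ m := by
  have h1 : 2 * i - 1 ≤ i * i := by nlinarith [mul_self_nonneg (i - 1)]
  have h2 : 0 ≤ i * i := mul_self_nonneg i
  omega

-- every element the loop collects divides m and is ≥ 1
theorem divsFrom_sound : ∀ (k : ℕ) (m i : Int), (m - i + 1).toNat = k →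
    1 ≤ i → 1 ≤ m → ∀ x ∈ pvDivsFrom m i, x ∣ m ∧ 1 ≤ x := by
  intro k
  induction k with
  | zero =>
      intro m i hk hi hm1 x hx
      rw [pvDivsFrom] at hx
      have : ¬ i * i ≤ m := by
        intro hg
        have := guard_le hg
        omega
      simp [this] at hx
  | succ n ih =>
      intro m i hk hi hm1 x hx
      rw [pvDivsFrom] at hx
      by_cases hg : i * i ≤ m
      · have hle := guard_le hg
        simp only [dif_pos hg, List.mem_append] at hx
        rcases hx with hx | hx
        · -- x ∈ the entry for i
          by_cases hmod : PySem.Int.mod m i == 0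
          · have hdvd : i ∣ m := by
              have := PySem.Int.mod_eq_zero_iff_dvd m i
              simp at hmod
              exact this.mp hmod
            obtain ⟨q, hq⟩ := hdvd
            have hq1 : 1 ≤ q := by nlinarith
            have hfd : PySem.Int.floordiv m i = q := by
              rw [fdiv_exact (by omega) ⟨q, hq⟩, hq, Int.mul_ediv_cancel_left _ (by omega)]
            simp only [hmod, if_pos, hfd] at hx
            rcases List.mem_cons.mp hx with rfl | hx
            · exact ⟨⟨q, hq⟩, hi⟩
            · by_cases hne : i ≠ q
              · simp [hne] at hx
                subst hx
                exact ⟨⟨i, by rw [hq, mul_comm]⟩, hq1⟩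
              · simp [hne] at hx
          · simp [hmod] at hx
        · exact ih m (i + 1) (by omega) (by omega) hm1 x hx
      · simp [hg] at hx

-- a divisor pair (d, e) with d ≤ e is collected at the step i = d
theorem divsFrom_hit (m d e : Int) (h1 : 1 ≤ d) (hde : d ≤ e) (hm : d * e = m) :
    d ∈ pvDivsFrom m d ∧ e ∈ pvDivsFrom m d := by
  have hg : d * d ≤ m := by nlinarith
  have hdvd : d ∣ m := ⟨e, hm.symm⟩
  have hmod : (PySem.Int.mod m d == 0) = true := by
    simp [PySem.Int.mod_eq_zero_iff_dvd m d]
    exact hdvd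
  have hfd : PySem.Int.floordiv m d = e := by
    rw [fdiv_exact (by omega) hdvd, ← hm, Int.mul_ediv_cancel_left _ (by omega)]
  rw [pvDivsFrom]
  simp only [dif_pos hg, hmod, if_pos, hfd, List.mem_append]
  constructor
  · exact Or.inl (List.mem_cons_self ..)
  · by_cases hie : d = e
    · exact Or.inl (by simp [hie])
    · exact Or.inl (by simp [hie])

-- a divisor pair (d, e) with d ≤ e is collected starting from any i ≤ d
theorem divsFrom_complete_pair : ∀ (k : ℕ) (m d e i : Int), (d - i).toNat = k →
    1 ≤ i → i ≤ d → d ≤ e → d * e = m → d ∈ pvDivsFrom m i ∧ e ∈ pvDivsFrom m i := by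
  intro k
  induction k with
  | zero =>
      intro m d e i hk hi hid hde hm
      have hieq : i = d := by omega
      subst hieq
      exact divsFrom_hit m i e hi hde hm
  | succ n ih =>
      intro m d e i hk hi hid hde hm
      by_cases hieq : i = d
      · subst hieq
        exact divsFrom_hit m i e hi hde hm
      · have hilt : i < d := by omega
        have hg : i * i ≤ m := by nlinarith
        obtain ⟨h1, h2⟩ := ih m d e (i + 1) (by omega) (by omega) (by omega) hde hm
        rw [pvDivsFrom]
        simp only [dif_pos hg, List.mem_append]
        exact ⟨Or.inr h1, Or.inr h2⟩

-- completeness: every positive divisor of m is collected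
theorem divsFrom_complete {m x : Int} (hm : 1 ≤ m) (hx1 : 1 ≤ x) (hx : x ∣ m) :
    x ∈ pvDivsFrom m 1 := by
  obtain ⟨e, he⟩ := hx
  have he1 : 1 ≤ e := by nlinarith
  by_cases hle : x ≤ e
  · exact (divsFrom_complete_pair (x - 1).toNat m x e 1 rfl le_rfl hx1 hle he.symm).1
  · exact (divsFrom_complete_pair (e - 1).toNat m e x 1 rfl le_rfl he1 (by omega)
      (by rw [mul_comm]; exact he.symm)).2

-- ===== VERDICT (by name: the statement is the Claim_ definition above) =====
theorem normalize_coeffs_py_spec : Claim_equal_normalize_coeffs_py := by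
  intro coeffs _
  unfold Spec_normalize_coeffs_py normalize_coeffs_py normalize_coeffs_py_alt
  by_cases hall : coeffs.all (fun c => c == 0)
  · have hnil : (coeffs.filter (fun c => !(c == 0))) = [] := by
      rw [List.filter_eq_nil_iff]
      intro c hc
      have := List.all_eq_true.mp hall c hc
      simpa using this
    simp [hall, hnil]
  · obtain ⟨c0, hc0mem, hc0ne⟩ : ∃ c ∈ coeffs, c ≠ 0 := by
      by_contra h
      push_neg at h
      exact hall (List.all_eq_true.mpr (fun c hc => by simpa using h c hc))
    have hne : ((coeffs.filter (fun c => !(c == 0))).map (fun c => |c|)) ≠ [] := by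
      simp only [ne_eq, List.map_eq_nil_iff, List.filter_eq_nil_iff]
      push_neg
      exact ⟨c0, hc0mem, by simp [hc0ne]⟩
    have hempty : ((coeffs.filter (fun c => !(c == 0))).map (fun c => |c|)).isEmpty = false := by
      simpa [List.isEmpty_iff] using hne
    set G : Int := coeffs.foldl pyGcd 0 with hG
    have hGnn : 0 ≤ G := fold_pyGcd_nonneg coeffs 0 le_rfl
    have hGdvd : ∀ c ∈ coeffs, G ∣ c := (fold_pyGcd_dvd coeffs 0).2
    have hGne : G ≠ 0 := by
      intro h0
      exact hc0ne (by simpa [h0] using (hGdvd c0 hc0mem))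
    have hGpos : 0 < G := lt_of_le_of_ne hGnn (Ne.symm hGne)
    -- A's reduce over the filtered/abs list equals G
    have hnzA : ((coeffs.filter (fun c => !(c == 0))).map (fun c => |c|)).foldl pyGcd 0 = G :=
      fold_pyGcd_filter_abs coeffs 0 le_rfl
    have hmem : |c0| ∈ (coeffs.filter (fun c => !(c == 0))).map (fun c => |c|) := by
      refine List.mem_map.mpr ⟨c0, ?_, rfl⟩
      exact List.mem_filter.mpr ⟨hc0mem, by simp [hc0ne]⟩
    have hgA : (match (coeffs.filter (fun c => !(c == 0))).map (fun c => |c|) with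
        | [] => (1 : Int)
        | h :: t => t.foldl pyGcd h) = G := by
      rcases hnz : (coeffs.filter (fun c => !(c == 0))).map (fun c => |c|) with _ | ⟨h, t⟩
      · rw [hnz] at hmem; simp at hmem
      · have hh : 0 ≤ h := by
          have hhm : h ∈ (coeffs.filter (fun c => !(c == 0))).map (fun c => |c|) := by
            rw [hnz]; exact List.mem_cons_self ..
          obtain ⟨x, _, hx⟩ := List.mem_map.mp hhm
          rw [← hx]; exact abs_nonneg x
        rw [hnz] at hnzA
        simpa [List.foldl_cons, pyGcd_zero_left hh] using hnzA
    -- A's post-division tuple is always the exact-division map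
    have hco1 : (if ((match (coeffs.filter (fun c => !(c == 0))).map (fun c => |c|) with
        | [] => (1 : Int)
        | h :: t => t.foldl pyGcd h : Int)) > 1
        then coeffs.map (fun c => PySem.Int.floordiv c (match (coeffs.filter (fun c => !(c == 0))).map (fun c => |c|) with
          | [] => (1 : Int)
          | h :: t => t.foldl pyGcd h))
        else coeffs) = coeffs.map (fun c => PySem.Int.floordiv c G) := by
      rw [hgA]
      by_cases hg1 : G > 1
      · simp [hg1]
      · have : G = 1 := by omega
        simp [this, PySem.Int.floordiv]
    -- B's m: a member of nonzero_abs, positive, and a multiple of G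
    obtain ⟨mv, hmv⟩ : ∃ mv, PySem.List.min? ((coeffs.filter (fun c => !(c == 0))).map (fun c => |c|)) (fun x => x) = some mv := by
      cases h : PySem.List.min? ((coeffs.filter (fun c => !(c == 0))).map (fun c => |c|)) (fun x => x) with
      | none =>
          rw [PySem.List.min?_eq_none_iff] at h
          exact absurd h hne
      | some v => exact ⟨v, rfl⟩
    have hmvmem := PySem.List.min?_mem hmv
    obtain ⟨cm, hcmF, hcmAbs⟩ := List.mem_map.mp hmvmem
    obtain ⟨hcmMem, hcmNe⟩ := List.mem_filter.mp hcmF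
    have hcmNe' : cm ≠ 0 := by simpa using hcmNe
    have hmv1 : 1 ≤ mv := by
      rw [← hcmAbs]
      have := abs_pos.mpr hcmNe'
      omega
    have hGm : G ∣ mv := by
      rw [← hcmAbs]
      exact (dvd_abs G cm).mpr (hGdvd cm hcmMem)
    have hG1 : 1 ≤ G := hGpos
    -- B's g equals G
    have hGdivs : G ∈ pvDivsFrom mv 1 := divsFrom_complete hmv1 hG1 hGm
    have hPG : (coeffs.all (fun c => PySem.Int.mod c G == 0)) = true := by
      rw [List.all_eq_true]
      intro c hc
      simpa [PySem.Int.mod_eq_zero_iff_dvd] using hGdvd c hc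
    have hGL : G ∈ (pvDivsFrom mv 1).filter (fun d => coeffs.all (fun c => PySem.Int.mod c d == 0)) :=
      List.mem_filter.mpr ⟨hGdivs, hPG⟩
    have hbound : ∀ x ∈ (pvDivsFrom mv 1).filter (fun d => coeffs.all (fun c => PySem.Int.mod c d == 0)), x ≤ G := by
      intro x hx
      obtain ⟨hxd, hxp⟩ := List.mem_filter.mp hx
      obtain ⟨_, hx1⟩ := divsFrom_sound (mv - 1 + 1).toNat mv 1 rfl le_rfl hmv1 x hxd
      have hxall : ∀ c ∈ coeffs, x ∣ c := by
        intro c hc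
        have := List.all_eq_true.mp hxp c hc
        simpa [PySem.Int.mod_eq_zero_iff_dvd] using this
      have hxG : x ∣ G := dvd_fold_pyGcd coeffs 0 x (dvd_zero x) hxall
      exact Int.le_of_dvd hGpos hxG
    obtain ⟨gv, hgv⟩ : ∃ gv, PySem.List.max? ((pvDivsFrom mv 1).filter (fun d => coeffs.all (fun c => PySem.Int.mod c d == 0))) (fun x => x) = some gv := by
      cases h : PySem.List.max? ((pvDivsFrom mv 1).filter (fun d => coeffs.all (fun c => PySem.Int.mod c d == 0))) (fun x => x) with
      | none =>
          rw [PySem.List.max?_eq_none_iff] at h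
          rw [h] at hGL
          exact absurd hGL (List.not_mem_nil)
      | some v => exact ⟨v, rfl⟩
    have hgvG : gv = G := by
      have h1 : gv ≤ G := hbound gv (PySem.List.max?_mem hgv)
      have h2 : G ≤ gv := PySem.List.max?_isMax hgv G hGL
      omega
    -- assemble both sides
    simp only [hall, Bool.false_eq_true, if_false, hco1, hempty, hmv, hgv, hgvG,
      Option.getD_some]
    rw [signScan_eq]
    have hsign := firstNZ_map_fdiv hGpos coeffs hGdvd
    have hfne : pvFirstNZ coeffs ≠ 0 := firstNZ_ne_zero coeffs ⟨c0, hc0mem, hc0ne⟩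
    by_cases hpos : pvFirstNZ coeffs > 0
    · have hnn : ¬ pvFirstNZ (coeffs.map (fun c => PySem.Int.floordiv c G)) < 0 := by
        rw [hsign]; omega
      simp [hnn, hpos]
    · have hneg : pvFirstNZ coeffs < 0 := by omega
      have hyy : pvFirstNZ (coeffs.map (fun c => PySem.Int.floordiv c G)) < 0 := hsign.mpr hneg
      simp only [hyy, if_true, hpos, if_false, List.map_map]
      refine List.map_congr_left (fun c hc => ?_)
      simp [Function.comp]
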